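-- pv_equiv track=rewrite | github.com/H0r4c3/Challenges | py.checkio.org/rolling_dice.py | rolling_dice
-- ===== SOURCE A (Python) =====
-- def rolling_dice(moves: str) -> int:
--     top, front, right = 1, 2, 3
--     for move in moves:
--         top, front, right = {
--             "N": (front, -top, right),
--             "S": (-front, top, right),
--             "W": (right, front, -top),
--             "E": (-right, front, top),
--         }[move]
--
--     return top % 7
-- ===== SOURCE B (Python) =====
-- def rolling_dice(moves: str) -> int:
--     # Backward provenance scan: instead of simulating the whole die forward,
--     # track only WHICH starting position's face ends up on top, scanning the
--     # moves right-to-left, then read that position's initial value off a table.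
--     prov = {
--         "N": {"T": "F", "F": "B", "B": "K", "K": "T"},
--         "S": {"T": "K", "K": "B", "B": "F", "F": "T"},
--         "W": {"T": "R", "R": "B", "B": "L", "L": "T"},
--         "E": {"T": "L", "L": "B", "B": "R", "R": "T"},
--     }
--     d = "T"
--     for move in reversed(moves):
--         d = prov[move].get(d, d)
--     return {"T": 1, "B": 6, "F": 2, "K": 5, "R": 3, "L": 4}[d]
-- ===== Notes on version B (the rewrite author's own statement) =====
-- stated objective: alternative
-- what changed: Instead of simulating the full die state forward move by move, B scans the moves right-to-left tracking only the provenance of the final top face (which starting position it came from) and reads the answer off a static table of initial face values.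
import Mathlib
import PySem

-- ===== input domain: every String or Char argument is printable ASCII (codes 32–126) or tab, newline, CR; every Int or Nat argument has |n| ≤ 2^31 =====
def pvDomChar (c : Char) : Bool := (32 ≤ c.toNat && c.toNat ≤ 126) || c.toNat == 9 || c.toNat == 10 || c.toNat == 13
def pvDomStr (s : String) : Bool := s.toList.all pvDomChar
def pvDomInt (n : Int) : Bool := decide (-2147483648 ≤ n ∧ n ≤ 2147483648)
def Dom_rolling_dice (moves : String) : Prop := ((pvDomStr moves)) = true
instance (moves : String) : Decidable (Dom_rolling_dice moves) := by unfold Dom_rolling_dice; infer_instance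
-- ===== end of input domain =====

-- B replaces A's forward simulation of the whole die by a right-to-left provenance scan
-- that tracks only which starting position's face ends up on top; objective: alternative.

-- ===== PORT A =====
-- one loop step of A: the dict literal is rebuilt from the current state and indexed by the move;
-- a move outside "NSWE" is a KeyError in Python = none here (excluded by Pre_)
def pvStepA (s : Int × Int × Int) (move : Char) : Option (Int × Int × Int) :=
  PySem.Dict.get? (PySem.Dict.ofList
    [('N', (s.2.1, -s.1, s.2.2)),
     ('S', (-s.2.1, s.1, s.2.2)),
     ('W', (s.2.2, s.2.1, -s.1)),
     ('E', (-s.2.2, s.2.1, s.1))]) move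

def rolling_dice (moves : String) : Int :=
  match moves.toList.foldl (fun o c => o.bind (fun s => pvStepA s c)) (some (1, 2, 3)) with
  | some (t, _, _) => PySem.Int.mod t 7
  | none => 0   -- unreachable under Pre_ (Python raises KeyError)

-- ===== PORT B =====
-- Source B's prov table: move ↦ (provenance ↦ provenance); missing move = KeyError = none
def pvProvB : PySem.Dict Char (PySem.Dict Char Char) :=
  PySem.Dict.ofList
    [('N', PySem.Dict.ofList [('T','F'), ('F','B'), ('B','K'), ('K','T')]),
     ('S', PySem.Dict.ofList [('T','K'), ('K','B'), ('B','F'), ('F','T')]),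
     ('W', PySem.Dict.ofList [('T','R'), ('R','B'), ('B','L'), ('L','T')]),
     ('E', PySem.Dict.ofList [('T','L'), ('L','B'), ('B','R'), ('R','T')])]

-- Source B's final value table
def pvValsB : PySem.Dict Char Int :=
  PySem.Dict.ofList [('T', 1), ('B', 6), ('F', 2), ('K', 5), ('R', 3), ('L', 4)]

def rolling_dice_alt (moves : String) : Int :=
  match moves.toList.reverse.foldl
      (fun o m => o.bind (fun d => (PySem.Dict.get? pvProvB m).map
        (fun t => PySem.Dict.getD t d d)))
      (some 'T') with
  | some d =>
    match PySem.Dict.get? pvValsB d with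
    | some v => v
    | none => 0   -- unreachable: the provenance always stays within the six faces
  | none => 0   -- KeyError on an invalid move (excluded by Pre_)

-- ===== PRECONDITION & SPEC =====
-- Pre_: every move is one of N/S/W/E; on any other character both Pythons raise KeyError.
def Pre_rolling_dice (moves : String) : Prop :=
  (moves.toList.all (fun c => c == 'N' || c == 'S' || c == 'W' || c == 'E')) = true
instance (moves : String) : Decidable (Pre_rolling_dice moves) := by
  unfold Pre_rolling_dice; infer_instance

def pvWitness_rolling_dice : String := "NNSWE"

def Spec_rolling_dice (moves : String) (out : Int) : Prop := out = rolling_dice_alt moves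
instance (moves : String) (out : Int) : Decidable (Spec_rolling_dice moves out) := by
  unfold Spec_rolling_dice; infer_instance

-- ===== CLAIM =====
def Claim_equal_rolling_dice : Prop :=
  ∀ (moves : String), Dom_rolling_dice moves → Pre_rolling_dice moves →
    Spec_rolling_dice moves (rolling_dice moves)

-- ===== LEMMAS AND PROOFS =====

-- total (valid-moves-only) versions of the two loop bodies, for the invariant
def pvStepA' (s : Int × Int × Int) (c : Char) : Int × Int × Int :=
  if c = 'N' then (s.2.1, -s.1, s.2.2)
  else if c = 'S' then (-s.2.1, s.1, s.2.2)
  else if c = 'W' then (s.2.2, s.2.1, -s.1)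
  else (-s.2.2, s.2.1, s.1)

def pvStepB' (d : Char) (c : Char) : Char :=
  if c = 'N' then (if d = 'T' then 'F' else if d = 'F' then 'B' else if d = 'B' then 'K' else if d = 'K' then 'T' else d)
  else if c = 'S' then (if d = 'T' then 'K' else if d = 'K' then 'B' else if d = 'B' then 'F' else if d = 'F' then 'T' else d)
  else if c = 'W' then (if d = 'T' then 'R' else if d = 'R' then 'B' else if d = 'B' then 'L' else if d = 'L' then 'T' else d)
  else (if d = 'T' then 'L' else if d = 'L' then 'B' else if d = 'B' then 'R' else if d = 'R' then 'T' else d)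

def pvValid (c : Char) : Prop := c = 'N' ∨ c = 'S' ∨ c = 'W' ∨ c = 'E'
def pvFace (d : Char) : Prop := d = 'T' ∨ d = 'B' ∨ d = 'F' ∨ d = 'K' ∨ d = 'R' ∨ d = 'L'

-- the value, mod 7, sitting at provenance position d of A's state (t, f, r)
def pvValA (s : Int × Int × Int) (d : Char) : Int :=
  if d = 'T' then PySem.Int.mod s.1 7
  else if d = 'B' then PySem.Int.mod (-s.1) 7
  else if d = 'F' then PySem.Int.mod s.2.1 7
  else if d = 'K' then PySem.Int.mod (-s.2.1) 7
  else if d = 'R' then PySem.Int.mod s.2.2 7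
  else if d = 'L' then PySem.Int.mod (-s.2.2) 7
  else 0

theorem pvStepA_valid (s : Int × Int × Int) (c : Char) (h : pvValid c) :
    pvStepA s c = some (pvStepA' s c) := by
  rcases h with h | h | h | h <;> subst h <;>
    simp [pvStepA, pvStepA', PySem.Dict.ofList, PySem.Dict.update, PySem.Dict.empty,
      PySem.Dict.insert, PySem.Dict.get?]

theorem pvStepB_valid (d c : Char) (hc : pvValid c) (hd : pvFace d) :
    (PySem.Dict.get? pvProvB c).map (fun t => PySem.Dict.getD t d d)
      = some (pvStepB' d c) := by
  rcases hc with h | h | h | h <;> subst h <;>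
    rcases hd with h | h | h | h | h | h <;> subst h <;> decide

theorem pvFaceStep (d c : Char) (hd : pvFace d) : pvFace (pvStepB' d c) := by
  rcases hd with h | h | h | h | h | h <;> subst h <;>
    by_cases h1 : c = 'N' <;> by_cases h2 : c = 'S' <;> by_cases h3 : c = 'W' <;>
    simp_all [pvStepB', pvFace]

theorem pvFoldB_face (l : List Char) (d : Char) (hd : pvFace d) :
    pvFace (l.foldl pvStepB' d) := by
  induction l generalizing d with
  | nil => exact hd
  | cons c l ih => exact ih _ (pvFaceStep d c hd)

-- the key step relation: moving the die then reading position d equals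
-- reading the moved-back position of the original die
theorem pvStep_rel (s : Int × Int × Int) (c d : Char) (h : pvValid c) :
    pvValA (pvStepA' s c) d = pvValA s (pvStepB' d c) := by
  rcases h with h | h | h | h <;> subst h <;>
    by_cases hT : d = 'T' <;> by_cases hB : d = 'B' <;> by_cases hF : d = 'F' <;>
    by_cases hK : d = 'K' <;> by_cases hR : d = 'R' <;> by_cases hL : d = 'L' <;>
    simp_all [pvStepA', pvStepB', pvValA]

theorem pvFoldA_valid (l : List Char) (s : Int × Int × Int)
    (h : ∀ c ∈ l, pvValid c) :
    l.foldl (fun o c => o.bind (fun s => pvStepA s c)) (some s)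
      = some (l.foldl pvStepA' s) := by
  induction l generalizing s with
  | nil => rfl
  | cons c l ih =>
    simp only [List.foldl_cons, Option.bind_some,
      pvStepA_valid s c (h c (by simp))]
    exact ih _ (fun c hc => h c (by simp [hc]))

theorem pvFoldB_valid (l : List Char) (d : Char)
    (h : ∀ c ∈ l, pvValid c) (hd : pvFace d) :
    l.foldl (fun o m => o.bind (fun d => (PySem.Dict.get? pvProvB m).map
        (fun t => PySem.Dict.getD t d d))) (some d)
      = some (l.foldl pvStepB' d) := by
  induction l generalizing d with
  | nil => rfl
  | cons c l ih =>
    simp only [List.foldl_cons, Option.bind_some,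
      pvStepB_valid d c (h c (by simp)) hd]
    exact ih _ (fun c hc => h c (by simp [hc])) (pvFaceStep d c hd)

-- main invariant: forward simulation read at d = original die read at the back-scanned provenance
theorem pvMain (l : List Char) (h : ∀ c ∈ l, pvValid c) (s : Int × Int × Int) (d : Char) :
    pvValA (l.foldl pvStepA' s) d = pvValA s (l.reverse.foldl pvStepB' d) := by
  induction l generalizing s d with
  | nil => rfl
  | cons c l ih =>
    have hc : pvValid c := h c (by simp)
    simp only [List.foldl_cons, List.reverse_cons, List.foldl_append, List.foldl_cons,
      List.foldl_nil]
    rw [ih (fun c hc => h c (by simp [hc])) (pvStepA' s c) d, pvStep_rel s c _ hc]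

-- the initial die read at a face position equals Source B's final value table
theorem pvInit (d : Char) (hd : pvFace d) :
    pvValA (1, 2, 3) d = (match PySem.Dict.get? pvValsB d with | some v => v | none => 0) := by
  rcases hd with h | h | h | h | h | h <;> subst h <;> decide

-- ===== VERDICT =====
theorem rolling_dice_spec : Claim_equal_rolling_dice := by
  intro moves _ hpre
  unfold Pre_rolling_dice at hpre
  have hv : ∀ c ∈ moves.toList, pvValid c := by
    intro c hc
    have := List.all_eq_true.mp hpre c hc
    unfold pvValid
    simp at this
    tauto
  have hT : pvFace 'T' := Or.inl rfl
  unfold Spec_rolling_dice rolling_dice rolling_dice_alt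
  rw [pvFoldA_valid _ _ hv,
    pvFoldB_valid _ _ (fun c hc => hv c (List.mem_reverse.mp hc)) hT]
  have hface := pvFoldB_face moves.toList.reverse 'T' hT
  have hmain := pvMain moves.toList hv (1, 2, 3) 'T'
  have hval : pvValA (moves.toList.foldl pvStepA' (1, 2, 3)) 'T'
      = PySem.Int.mod (moves.toList.foldl pvStepA' (1, 2, 3)).1 7 := by
    simp [pvValA]
  rw [hval] at hmain
  generalize hA : moves.toList.foldl pvStepA' (1, 2, 3) = sa at hmain ⊢
  generalize hB : moves.toList.reverse.foldl pvStepB' 'T' = db at hmain hface ⊢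
  rcases sa with ⟨t, f, r⟩
  dsimp only
  rw [← pvInit db hface, ← hmain]
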